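-- pv_equiv track=rewrite | github.com/carlzimmerman/zimmerman-formula | extended_research/biotech/hybrid_z2_test/m4_pipeline/m4_binding_affinity.py | count_potential_interactions
-- ===== SOURCE A (Python) =====
-- from typing import Dict, List, Tuple, Optional, Set
--
-- def count_potential_interactions(seq1: str, seq2: str,
--                                 interface1: List[int],
--                                 interface2: List[int]) -> Dict:
--     """Count potential favorable interactions."""
--     interactions = {
--         'salt_bridges': 0,
--         'hydrogen_bonds': 0,
--         'hydrophobic_contacts': 0,
--         'aromatic_interactions': 0,
--         'cation_pi': 0,
--     }
--
--     # Get interface residues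
--     res1 = [seq1[i] for i in interface1 if i < len(seq1)]
--     res2 = [seq2[i] for i in interface2 if i < len(seq2)]
--
--     # Positively charged in seq1
--     pos1 = [aa for aa in res1 if aa in 'RK']
--     neg1 = [aa for aa in res1 if aa in 'DE']
--     aromatic1 = [aa for aa in res1 if aa in 'FWY']
--     hbond1 = [aa for aa in res1 if aa in 'NQSTYW']
--     hydrophobic1 = [aa for aa in res1 if aa in 'AILMVF']
--
--     pos2 = [aa for aa in res2 if aa in 'RK']
--     neg2 = [aa for aa in res2 if aa in 'DE']
--     aromatic2 = [aa for aa in res2 if aa in 'FWY']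
--     hbond2 = [aa for aa in res2 if aa in 'NQSTYW']
--     hydrophobic2 = [aa for aa in res2 if aa in 'AILMVF']
--
--     # Estimate interactions
--     interactions['salt_bridges'] = min(len(pos1) + len(neg1),
--                                       len(pos2) + len(neg2))
--     interactions['hydrogen_bonds'] = min(len(hbond1), len(hbond2)) * 2
--     interactions['hydrophobic_contacts'] = min(len(hydrophobic1), len(hydrophobic2))
--     interactions['aromatic_interactions'] = min(len(aromatic1), len(aromatic2))
--     interactions['cation_pi'] = min(len(pos1) + len(pos2),
--                                     len(aromatic1) + len(aromatic2))
--
--     return interactions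
-- ===== SOURCE B (Python) =====
-- from typing import Dict, List
--
--
-- def _class_counts(seq: str, interface: List[int]):
--     """One pass over the interface residues, maintaining five counters."""
--     pos = neg = aromatic = hbond = hydrophobic = 0
--     for i in interface:
--         if i < len(seq):
--             aa = seq[i]
--             if aa in 'RK':
--                 pos += 1
--             if aa in 'DE':
--                 neg += 1
--             if aa in 'FWY':
--                 aromatic += 1
--             if aa in 'NQSTYW':
--                 hbond += 1
--             if aa in 'AILMVF':
--                 hydrophobic += 1
--     return pos, neg, aromatic, hbond, hydrophobic
--
--
-- def count_potential_interactions(seq1: str, seq2: str,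
--                                  interface1: List[int],
--                                  interface2: List[int]) -> Dict:
--     """Count potential favorable interactions (single counting pass per sequence)."""
--     pos1, neg1, aromatic1, hbond1, hydrophobic1 = _class_counts(seq1, interface1)
--     pos2, neg2, aromatic2, hbond2, hydrophobic2 = _class_counts(seq2, interface2)
--     return {
--         'salt_bridges': min(pos1 + neg1, pos2 + neg2),
--         'hydrogen_bonds': min(hbond1, hbond2) * 2,
--         'hydrophobic_contacts': min(hydrophobic1, hydrophobic2),
--         'aromatic_interactions': min(aromatic1, aromatic2),
--         'cation_pi': min(pos1 + pos2, aromatic1 + aromatic2),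
--     }
-- ===== Notes on version B (the rewrite author's own statement) =====
-- stated objective: simpler
-- what changed: Replaces A's ten intermediate per-category filtered lists (two comprehension passes per category) by a single counting pass per sequence that maintains five integer counters, then assembles the same dict; Pre_ excludes only inputs where both raise IndexError (interface index below -len(seq)).
import Mathlib
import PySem

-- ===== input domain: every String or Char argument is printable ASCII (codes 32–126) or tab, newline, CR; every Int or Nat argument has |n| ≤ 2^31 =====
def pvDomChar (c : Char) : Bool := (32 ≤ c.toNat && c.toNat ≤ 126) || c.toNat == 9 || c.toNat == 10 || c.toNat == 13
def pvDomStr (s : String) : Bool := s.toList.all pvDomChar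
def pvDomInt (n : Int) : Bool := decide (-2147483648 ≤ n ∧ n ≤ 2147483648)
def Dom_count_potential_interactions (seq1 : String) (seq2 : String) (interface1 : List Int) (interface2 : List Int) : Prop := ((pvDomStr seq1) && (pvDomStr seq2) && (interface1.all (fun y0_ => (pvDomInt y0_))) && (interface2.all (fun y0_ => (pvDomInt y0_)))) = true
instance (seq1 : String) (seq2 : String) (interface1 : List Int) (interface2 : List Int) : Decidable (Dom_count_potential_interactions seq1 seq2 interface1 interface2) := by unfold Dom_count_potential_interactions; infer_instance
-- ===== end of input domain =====

-- B replaces A's ten per-category list comprehensions by one counting pass per sequence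
-- maintaining five integer counters (objective: simpler, same asymptotic cost, lower constants).

-- ===== PORT A =====
-- `aa in 'RK'` for a single character aa is exactly char-list membership.
def pvInCls (cls : List Char) (aa : Char) : Bool := cls.contains aa

-- [seq[i] for i in interface if i < len(seq)] ; PySem.Str.pyGet? = none is IndexError,
-- excluded by Pre_ (the filterMap skip is unreachable inside Pre_).
def pvRes (seq : String) (interface : List Int) : List Char :=
  (interface.filter (fun i => i < PySem.Str.len seq)).filterMap (fun i => PySem.Str.pyGet? seq i)

def count_potential_interactions (seq1 : String) (seq2 : String) (interface1 : List Int) (interface2 : List Int) : List (String × Int) :=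
  let res1 := pvRes seq1 interface1
  let res2 := pvRes seq2 interface2
  let pos1 := res1.filter (pvInCls ['R','K'])
  let neg1 := res1.filter (pvInCls ['D','E'])
  let aromatic1 := res1.filter (pvInCls ['F','W','Y'])
  let hbond1 := res1.filter (pvInCls ['N','Q','S','T','Y','W'])
  let hydrophobic1 := res1.filter (pvInCls ['A','I','L','M','V','F'])
  let pos2 := res2.filter (pvInCls ['R','K'])
  let neg2 := res2.filter (pvInCls ['D','E'])
  let aromatic2 := res2.filter (pvInCls ['F','W','Y'])
  let hbond2 := res2.filter (pvInCls ['N','Q','S','T','Y','W'])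
  let hydrophobic2 := res2.filter (pvInCls ['A','I','L','M','V','F'])
  [("salt_bridges", min ((pos1.length : Int) + neg1.length) ((pos2.length : Int) + neg2.length)),
   ("hydrogen_bonds", min (hbond1.length : Int) (hbond2.length : Int) * 2),
   ("hydrophobic_contacts", min (hydrophobic1.length : Int) (hydrophobic2.length : Int)),
   ("aromatic_interactions", min (aromatic1.length : Int) (aromatic2.length : Int)),
   ("cation_pi", min ((pos1.length : Int) + pos2.length) ((aromatic1.length : Int) + aromatic2.length))]

-- ===== PORT B =====
-- one pass over the interface list, five counters; pyGet? = none is IndexError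
-- (B's Python raises there too; excluded by Pre_, here the counters are left unchanged).
def pvStep (seq : String) (c : Int × Int × Int × Int × Int) (i : Int) : Int × Int × Int × Int × Int :=
  if i < PySem.Str.len seq then
    match PySem.Str.pyGet? seq i with
    | some aa =>
      (c.1 + (if pvInCls ['R','K'] aa then 1 else 0),
       c.2.1 + (if pvInCls ['D','E'] aa then 1 else 0),
       c.2.2.1 + (if pvInCls ['F','W','Y'] aa then 1 else 0),
       c.2.2.2.1 + (if pvInCls ['N','Q','S','T','Y','W'] aa then 1 else 0),
       c.2.2.2.2 + (if pvInCls ['A','I','L','M','V','F'] aa then 1 else 0))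
    | none => c
  else c

def pvClassCounts (seq : String) (interface : List Int) : Int × Int × Int × Int × Int :=
  interface.foldl (pvStep seq) (0, 0, 0, 0, 0)

def count_potential_interactions_alt (seq1 : String) (seq2 : String) (interface1 : List Int) (interface2 : List Int) : List (String × Int) :=
  let c1 := pvClassCounts seq1 interface1
  let c2 := pvClassCounts seq2 interface2
  [("salt_bridges", min (c1.1 + c1.2.1) (c2.1 + c2.2.1)),
   ("hydrogen_bonds", min c1.2.2.2.1 c2.2.2.2.1 * 2),
   ("hydrophobic_contacts", min c1.2.2.2.2 c2.2.2.2.2),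
   ("aromatic_interactions", min c1.2.2.1 c2.2.2.1),
   ("cation_pi", min (c1.1 + c2.1) (c1.2.2.1 + c2.2.2.1))]

-- ===== PRECONDITION & SPEC =====
-- Pre_ excludes exactly the inputs where Python A raises IndexError: an interface index i
-- with i < len(seq) but i < -len(seq) (B's Python raises there too).
def Pre_count_potential_interactions (seq1 : String) (seq2 : String) (interface1 : List Int) (interface2 : List Int) : Prop :=
  (∀ i ∈ interface1, i < PySem.Str.len seq1 → -(PySem.Str.len seq1 : Int) ≤ i) ∧
  (∀ i ∈ interface2, i < PySem.Str.len seq2 → -(PySem.Str.len seq2 : Int) ≤ i)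
instance (seq1 : String) (seq2 : String) (interface1 : List Int) (interface2 : List Int) : Decidable (Pre_count_potential_interactions seq1 seq2 interface1 interface2) := by unfold Pre_count_potential_interactions; infer_instance

def pvWitness_count_potential_interactions : String × String × List Int × List Int :=
  ("RKDE", "FWYN", [0, 1, -1, 9], [0, 2])

def Spec_count_potential_interactions (seq1 : String) (seq2 : String) (interface1 : List Int) (interface2 : List Int) (out : List (String × Int)) : Prop := out = count_potential_interactions_alt seq1 seq2 interface1 interface2
instance (seq1 : String) (seq2 : String) (interface1 : List Int) (interface2 : List Int) (out : List (String × Int)) : Decidable (Spec_count_potential_interactions seq1 seq2 interface1 interface2 out) := by unfold Spec_count_potential_interactions; infer_instance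

-- ===== CLAIM (what is proved, stated in full; the proofs are below) =====
def Claim_equal_count_potential_interactions : Prop := ∀ (seq1 : String) (seq2 : String) (interface1 : List Int) (interface2 : List Int), Dom_count_potential_interactions seq1 seq2 interface1 interface2 → Pre_count_potential_interactions seq1 seq2 interface1 interface2 → Spec_count_potential_interactions seq1 seq2 interface1 interface2 (count_potential_interactions seq1 seq2 interface1 interface2)

-- ===== LEMMAS AND PROOFS =====

-- unfolding one step of A's residue list
theorem pvRes_cons (seq : String) (i : Int) (rest : List Int) :
    pvRes seq (i :: rest) =
      (if i < PySem.Str.len seq then (PySem.Str.pyGet? seq i).toList else []) ++ pvRes seq rest := by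
  by_cases hlt : i < PySem.Str.len seq
  · have hlt' : i < (seq.length : Int) := by simpa [PySem.Str.len_eq] using hlt
    cases hg : PySem.Chars.pyGet? seq.toList i with
    | none =>
      have hg' : PySem.List.pyGet? seq.toList i = none := hg
      simp [pvRes, List.filter_cons, hlt, hlt', hg, hg', List.filterMap_cons, PySem.Str.pyGet?]
    | some aa =>
      have hg' : PySem.List.pyGet? seq.toList i = some aa := hg
      simp [pvRes, List.filter_cons, hlt, hlt', hg, hg', List.filterMap_cons, PySem.Str.pyGet?]
  · have hlt' : ¬ i < (seq.length : Int) := by simpa [PySem.Str.len_eq] using hlt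
    simp [pvRes, List.filter_cons, hlt, hlt']

-- the per-sequence single pass computes exactly the five filtered-list lengths of A
theorem pvClassCounts_foldl (seq : String) (interface : List Int)
    (c : Int × Int × Int × Int × Int) :
    interface.foldl (pvStep seq) c =
      (c.1 + ((pvRes seq interface).filter (pvInCls ['R','K'])).length,
       c.2.1 + ((pvRes seq interface).filter (pvInCls ['D','E'])).length,
       c.2.2.1 + ((pvRes seq interface).filter (pvInCls ['F','W','Y'])).length,
       c.2.2.2.1 + ((pvRes seq interface).filter (pvInCls ['N','Q','S','T','Y','W'])).length,
       c.2.2.2.2 + ((pvRes seq interface).filter (pvInCls ['A','I','L','M','V','F'])).length) := by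
  induction interface generalizing c with
  | nil => simp [pvRes]
  | cons i rest ih =>
    simp only [List.foldl_cons]
    rw [ih, pvRes_cons]
    set L := pvRes seq rest with hL
    simp only [List.filter_append, List.length_append, Nat.cast_add]
    by_cases hlt : i < PySem.Str.len seq
    · have hlt' : i < (seq.length : Int) := by simpa [PySem.Str.len_eq] using hlt
      cases hg : PySem.Chars.pyGet? seq.toList i with
      | none =>
        have hg' : PySem.List.pyGet? seq.toList i = none := hg
        simp [pvStep, PySem.Str.pyGet?, hlt, hlt', hg, hg']
      | some aa =>
        have hg' : PySem.List.pyGet? seq.toList i = some aa := hg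
        simp only [pvStep, PySem.Str.pyGet?, hlt, hlt', if_true, hg, hg', Option.toList_some,
          List.filter_cons, List.filter_nil]
        by_cases h1 : pvInCls ['R','K'] aa <;>
        by_cases h2 : pvInCls ['D','E'] aa <;>
        by_cases h3 : pvInCls ['F','W','Y'] aa <;>
        by_cases h4 : pvInCls ['N','Q','S','T','Y','W'] aa <;>
        by_cases h5 : pvInCls ['A','I','L','M','V','F'] aa <;>
          simp only [h1, h2, h3, h4, h5, Bool.false_eq_true, decide_true, decide_false,
            if_true, if_false, List.length_cons, List.length_nil, Nat.cast_one, Nat.cast_zero,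
            Prod.mk.injEq] <;> refine ⟨by omega, by omega, by omega, by omega, by omega⟩
    · have hlt' : ¬ i < (seq.length : Int) := by simpa [PySem.Str.len_eq] using hlt
      simp [pvStep, hlt, hlt']

theorem pvClassCounts_eq (seq : String) (interface : List Int) :
    pvClassCounts seq interface =
      ((((pvRes seq interface).filter (pvInCls ['R','K'])).length : Int),
       (((pvRes seq interface).filter (pvInCls ['D','E'])).length : Int),
       (((pvRes seq interface).filter (pvInCls ['F','W','Y'])).length : Int),
       (((pvRes seq interface).filter (pvInCls ['N','Q','S','T','Y','W'])).length : Int),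
       (((pvRes seq interface).filter (pvInCls ['A','I','L','M','V','F'])).length : Int)) := by
  simpa using pvClassCounts_foldl seq interface (0, 0, 0, 0, 0)

-- ===== VERDICT (by name: the statement is the Claim_ definition above) =====
theorem count_potential_interactions_spec : Claim_equal_count_potential_interactions := by
  intro seq1 seq2 interface1 interface2 _ _
  unfold Spec_count_potential_interactions
  unfold count_potential_interactions count_potential_interactions_alt
  rw [pvClassCounts_eq, pvClassCounts_eq]
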